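-- pv_equiv track=rewrite | github.com/raeez/chiral-bar-cobar | compute/scripts/verify_koszul_dual_hilbert.py | exterior_algebra_dims
-- ===== SOURCE A (Python) =====
-- from math import comb
--
-- def exterior_algebra_dims(d, max_w):
--     """
--     Compute dim Λ(V*)_w for V = C^d at each mode level m≥1.
--     This is [q^w] in Π_{m≥1} (1+q^m)^d.
--     """
--     # Use polynomial multiplication
--     # Start with 1
--     coeffs = [0] * (max_w + 1)
--     coeffs[0] = 1
--
--     for m in range(1, max_w + 1):
--         # Multiply by (1 + q^m)^d
--         # (1+q^m)^d = Σ_k C(d,k) q^{mk}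
--         new_coeffs = [0] * (max_w + 1)
--         for k in range(min(d, max_w // m) + 1):
--             c = comb(d, k)
--             for j in range(max_w + 1 - m * k):
--                 new_coeffs[j + m * k] += coeffs[j] * c
--         coeffs = new_coeffs
--
--     return coeffs
-- ===== SOURCE B (Python) =====
-- def exterior_algebra_dims(d, max_w):
--     """
--     [q^w] of Prod_{m>=1} (1+q^m)^d, computed as P^d mod q^(max_w+1) where
--     P = Prod_{m=1}^{max_w} (1+q^m) is built once by shift-adds (no binomials),
--     and the d-th power is taken by binary exponentiation with truncated
--     convolution.
--     """
--     n = max_w + 1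
--     base = [0] * n
--     base[0] = 1
--     for m in range(1, n):
--         base = [base[j] + (base[j - m] if j >= m else 0) for j in range(n)]
--
--     def mul(f, g):
--         h = [0] * n
--         for i in range(n):
--             for j in range(n - i):
--                 h[i + j] += f[i] * g[j]
--         return h
--
--     result = [0] * n
--     result[0] = 1
--     e = d
--     while e > 0:
--         if e & 1:
--             result = mul(result, base)
--         base = mul(base, base)
--         e >>= 1
--     return result
-- ===== Notes on version B (the rewrite author's own statement) =====
-- stated objective: alternative
-- what changed: B never touches binomial coefficients: it builds the single product P = prod_{m=1}^{max_w}(1+q^m) mod q^(max_w+1) by 0/1 shift-adds and raises P to the d-th power by binary exponentiation (square-and-multiply) with truncated convolution, instead of A's per-mode comb(d,k) convolution.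
-- outside the precondition, e.g. on exterior_algebra_dims(-1, 2): A returns [0, 0, 0], B returns [1, 0, 0]
import Mathlib
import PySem

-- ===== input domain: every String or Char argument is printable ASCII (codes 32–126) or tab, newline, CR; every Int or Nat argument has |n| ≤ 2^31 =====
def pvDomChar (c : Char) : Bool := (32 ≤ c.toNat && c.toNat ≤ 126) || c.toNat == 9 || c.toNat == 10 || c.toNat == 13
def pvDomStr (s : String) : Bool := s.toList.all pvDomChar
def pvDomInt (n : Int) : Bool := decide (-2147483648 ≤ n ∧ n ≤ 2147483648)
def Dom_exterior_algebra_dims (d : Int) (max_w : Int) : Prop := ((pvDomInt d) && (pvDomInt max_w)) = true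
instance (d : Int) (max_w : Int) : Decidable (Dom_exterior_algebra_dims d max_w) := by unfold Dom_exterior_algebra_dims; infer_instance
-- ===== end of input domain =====

-- B avoids binomial coefficients entirely: it builds P = Π_{m=1}^{max_w}(1+q^m) mod q^(max_w+1)
-- by 0/1 shift-adds and raises it to the d-th power by binary exponentiation with truncated
-- convolution, instead of A's per-mode comb(d,k) convolution (objective: alternative).

-- ===== PORT A =====
-- Literal port of A.  comb(d, k) is ported as Nat.choose d.toNat k, exact for d ≥ 0
-- (inside Pre_ the k-loop is only entered when 0 ≤ d, so comb's argument is nonnegative).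
def exterior_algebra_dims (d : Int) (max_w : Int) : List Int :=
  let n := (max_w + 1).toNat
  let coeffs := (List.replicate n (0 : Int)).set 0 1       -- coeffs[0] = 1 (Python raises for max_w < 0; outside Pre_)
  (List.range' 1 (n - 1)).foldl (fun (coeffs : List Int) (m : Nat) =>   -- for m in range(1, max_w + 1)
    let new0 := List.replicate n (0 : Int)
    (List.range (min d (PySem.Int.floordiv max_w (m : Int)) + 1).toNat).foldl (fun nc k =>
      let c : Int := (Nat.choose d.toNat k : Int)          -- comb(d, k)
      (List.range (n - m * k)).foldl (fun nc j =>          -- range(max_w + 1 - m*k); equal for max_w ≥ 0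
        nc.set (j + m * k) (nc.getD (j + m * k) 0 + coeffs.getD j 0 * c)) nc) new0) coeffs

-- ===== PORT B =====
-- truncated product: h[i+j] += f[i] * g[j] for i in range(n), j in range(n-i)
def pvMulT (n : Nat) (f g : List Int) : List Int :=
  (List.range n).foldl (fun h i =>
    (List.range (n - i)).foldl (fun h j =>
      h.set (i + j) (h.getD (i + j) 0 + f.getD i 0 * g.getD j 0)) h)
    (List.replicate n (0 : Int))

-- the while-loop: while e > 0: if e & 1: result = mul(result, base); base = mul(base, base); e >>= 1
def pvPowT (n : Nat) (base result : List Int) (e : Int) : List Int :=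
  if h : 0 < e then
    pvPowT n (pvMulT n base base)
      (if PySem.Int.band e 1 ≠ 0 then pvMulT n result base else result)
      (e >>> (1 : Nat))
  else result
termination_by e.toNat
decreasing_by
  have h2 : e >>> (1 : Nat) = e / 2 := by
    rw [Int.shiftRight_eq_div_pow]; norm_num
  rw [h2]; omega

def exterior_algebra_dims_alt (d : Int) (max_w : Int) : List Int :=
  let n := (max_w + 1).toNat
  let base := (List.range' 1 (n - 1)).foldl (fun (b : List Int) (m : Nat) =>
      (List.range n).map (fun j => b.getD j 0 + if j ≥ m then b.getD (j - m) 0 else 0))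
    ((List.replicate n (0 : Int)).set 0 1)                 -- base[0] = 1 (raises for max_w < 0; outside Pre_)
  pvPowT n base ((List.replicate n (0 : Int)).set 0 1) d

-- ===== PRECONDITION & SPEC =====
-- A raises IndexError for max_w < 0.  Pre_ also restricts to the function's natural
-- domain d ≥ 0 (a dimension) when max_w ≥ 1: for negative d with max_w ≥ 1 A's all-zero
-- return is an artefact of its empty comb loop (B's binary exponentiation returns the
-- identity polynomial there, e.g. B (-1) 2 = [1, 0, 0]).
def Pre_exterior_algebra_dims (d : Int) (max_w : Int) : Prop :=
  0 ≤ max_w ∧ (0 ≤ d ∨ max_w = 0)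
instance (d : Int) (max_w : Int) : Decidable (Pre_exterior_algebra_dims d max_w) := by
  unfold Pre_exterior_algebra_dims; infer_instance
def pvWitness_exterior_algebra_dims : Int × Int := (3, 5)

def Spec_exterior_algebra_dims (d : Int) (max_w : Int) (out : List Int) : Prop := out = exterior_algebra_dims_alt d max_w
instance (d : Int) (max_w : Int) (out : List Int) : Decidable (Spec_exterior_algebra_dims d max_w out) := by unfold Spec_exterior_algebra_dims; infer_instance

-- ===== CLAIM (what is proved, stated in full; the proofs are below) =====
def Claim_equal_exterior_algebra_dims : Prop := ∀ (d : Int) (max_w : Int), Dom_exterior_algebra_dims d max_w → Pre_exterior_algebra_dims d max_w → Spec_exterior_algebra_dims d max_w (exterior_algebra_dims d max_w)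

-- ===== LEMMAS AND PROOFS =====

theorem getD_set_ite (l : List Int) (i j : Nat) (v : Int) :
    (l.set i v).getD j 0 = if i = j ∧ i < l.length then v else l.getD j 0 := by
  rcases Nat.lt_or_ge j l.length with hj | hj
  · by_cases hij : i = j
    · subst hij
      simp [List.getD_eq_getElem?_getD, hj]
    · simp [List.getD_eq_getElem?_getD, hij]
  · have h1 : (l.set i v).getD j 0 = 0 := by
      apply List.getD_eq_default; simpa using hj
    have h2 : l.getD j 0 = 0 := List.getD_eq_default _ _ hj
    rw [h1, h2]
    split_ifs with h
    · omega
    · rfl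

-- generic scatter loop: add F j at position j + off for j < len
lemma inner_len (F : Nat → Int) (off len : Nat) (nc : List Int) :
    ((List.range len).foldl (fun nc j => nc.set (j + off) (nc.getD (j + off) 0 + F j)) nc).length
      = nc.length := by
  induction len generalizing nc with
  | zero => simp
  | succ len ih =>
    rw [List.range_succ, List.foldl_append]
    simp only [List.foldl_cons, List.foldl_nil, List.length_set]
    exact ih nc

lemma inner_spec (F : Nat → Int) (off len : Nat) (nc : List Int)
    (h : off + len ≤ nc.length) : ∀ i : Nat,
    ((List.range len).foldl (fun nc j => nc.set (j + off) (nc.getD (j + off) 0 + F j)) nc).getD i 0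
      = nc.getD i 0 + (if off ≤ i ∧ i < off + len then F (i - off) else 0) := by
  induction len generalizing nc with
  | zero => intro i; simp
  | succ len ih =>
    intro i
    rw [List.range_succ, List.foldl_append]
    simp only [List.foldl_cons, List.foldl_nil]
    have hlen : off + len ≤ nc.length := by omega
    have hP := ih nc hlen
    have hL := inner_len F off len nc
    rw [getD_set_ite, hL]
    by_cases hi : len + off = i
    · rw [if_pos ⟨hi, by omega⟩]
      subst hi
      rw [hP (len + off)]
      rw [if_neg (by omega), if_pos (by omega)]
      have he : len + off - off = len := by omega
      rw [he]; ring
    · rw [if_neg (by intro hc; exact hi hc.1)]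
      rw [hP i]
      by_cases hin : off ≤ i ∧ i < off + len
      · rw [if_pos hin, if_pos (by omega)]
      · rw [if_neg hin, if_neg (by omega)]

-- generic double loop: for k < K, scatter F k · at offsets σ k, into a fresh zero list of length n
lemma gloop (n : Nat) (σ : Nat → Nat) (F : Nat → Nat → Int) (K : Nat) :
    (((List.range K).foldl (fun nc k =>
        (List.range (n - σ k)).foldl (fun nc j =>
          nc.set (j + σ k) (nc.getD (j + σ k) 0 + F k j)) nc)
      (List.replicate n (0:Int))).length = n)
    ∧ ∀ i, ((List.range K).foldl (fun nc k =>
        (List.range (n - σ k)).foldl (fun nc j =>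
          nc.set (j + σ k) (nc.getD (j + σ k) 0 + F k j)) nc)
      (List.replicate n (0:Int))).getD i 0
        = ∑ k ∈ Finset.range K,
            if σ k ≤ i ∧ i < n then F k (i - σ k) else 0 := by
  induction K with
  | zero => constructor
            · simp
            · intro i; simp
  | succ K ih =>
    obtain ⟨ihL, ihG⟩ := ih
    rw [List.range_succ, List.foldl_append]
    simp only [List.foldl_cons, List.foldl_nil]
    by_cases hK : σ K ≤ n
    · constructor
      · rw [inner_len]; exact ihL
      · intro i
        rw [inner_spec _ _ _ _ (by omega) i, ihG i, Finset.sum_range_succ]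
        congr 1
        have hn : σ K + (n - σ K) = n := by omega
        rw [hn]
    · have h0 : n - σ K = 0 := by omega
      rw [h0]
      constructor
      · simpa using ihL
      · intro i
        rw [Finset.sum_range_succ, if_neg (by omega)]
        simpa using ihG i

-- pvRep n L p : L is the length-n truncation of the polynomial p
def pvRep (n : Nat) (L : List Int) (p : Polynomial ℤ) : Prop :=
  L.length = n ∧ ∀ i : Nat, L.getD i 0 = if i < n then p.coeff i else 0

lemma rep_eq {n : Nat} {L M : List Int} {p : Polynomial ℤ}
    (hL : pvRep n L p) (hM : pvRep n M p) : L = M := by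
  obtain ⟨hL1, hL2⟩ := hL
  obtain ⟨hM1, hM2⟩ := hM
  apply List.ext_getElem (by rw [hL1, hM1])
  intro i h1 h2
  rw [← List.getD_eq_getElem L 0 h1, ← List.getD_eq_getElem M 0 h2, hL2, hM2]

lemma rep_one {n : Nat} (hn : 1 ≤ n) :
    pvRep n ((List.replicate n (0 : Int)).set 0 1) 1 := by
  constructor
  · simp
  · intro i
    rw [getD_set_ite]
    simp only [List.length_replicate, Polynomial.coeff_one]
    rcases Nat.lt_or_ge i n with h | h
    · rw [List.getD_eq_getElem _ _ (by simpa using h)]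
      simp only [List.getElem_replicate]
      split_ifs <;> omega
    · rw [List.getD_eq_default _ _ (by simpa using h)]
      split_ifs <;> omega

lemma pvMulT_eq (n : Nat) (f g : List Int) :
    pvMulT n f g = (List.range n).foldl (fun nc k =>
      (List.range (n - k)).foldl (fun nc j =>
        nc.set (j + k) (nc.getD (j + k) 0 + f.getD k 0 * g.getD j 0)) nc)
      (List.replicate n (0:Int)) := by
  unfold pvMulT
  congr 1
  funext h i
  congr 1
  funext h' j
  rw [Nat.add_comm i j]

lemma rep_mulT {n : Nat} {f g : List Int} {p q : Polynomial ℤ}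
    (hf : pvRep n f p) (hg : pvRep n g q) : pvRep n (pvMulT n f g) (p * q) := by
  obtain ⟨hf1, hf2⟩ := hf
  obtain ⟨hg1, hg2⟩ := hg
  obtain ⟨hL, hG⟩ := gloop n (fun i => i) (fun i j => f.getD i 0 * g.getD j 0) n
  rw [pvMulT_eq]
  constructor
  · exact hL
  · intro s
    rw [hG s]
    rcases Nat.lt_or_ge s n with hs | hs
    · rw [if_pos hs, Polynomial.coeff_mul,
        Finset.Nat.sum_antidiagonal_eq_sum_range_succ_mk]
      have hsub : Finset.range (s + 1) ⊆ Finset.range n := by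
        intro x hx
        simp only [Finset.mem_range] at hx ⊢
        omega
      have hzero : ∀ x ∈ Finset.range n, x ∉ Finset.range (s + 1) →
          (if x ≤ s ∧ s < n then f.getD x 0 * g.getD (s - x) 0 else 0) = 0 := by
        intro x hx hx2
        rw [if_neg]
        intro hc
        exact hx2 (Finset.mem_range.mpr (by omega))
      rw [← Finset.sum_subset hsub hzero]
      apply Finset.sum_congr rfl
      intro i hi
      have hi' : i < s + 1 := Finset.mem_range.mp hi
      rw [if_pos ⟨by omega, hs⟩, hf2 i, hg2 (s - i), if_pos (by omega), if_pos (by omega)]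
    · rw [if_neg (by omega)]
      apply Finset.sum_eq_zero
      intro i _
      rw [if_neg (by omega)]

lemma coeff_mul_one_add_X_pow (p : Polynomial ℤ) (m i : Nat) :
    (p * (1 + Polynomial.X ^ m)).coeff i
      = p.coeff i + (if m ≤ i then p.coeff (i - m) else 0) := by
  rw [mul_add, mul_one, Polynomial.coeff_add, Polynomial.coeff_mul_X_pow']

lemma rep_baseStep {n : Nat} {b : List Int} {p : Polynomial ℤ} (m : Nat)
    (hb : pvRep n b p) :
    pvRep n ((List.range n).map (fun j => b.getD j 0 + if j ≥ m then b.getD (j - m) 0 else 0))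
      (p * (1 + Polynomial.X ^ m)) := by
  obtain ⟨hb1, hb2⟩ := hb
  constructor
  · simp
  · intro i
    rcases Nat.lt_or_ge i n with h | h
    · rw [List.getD_eq_getElem _ _ (by simpa using h), if_pos h]
      simp only [List.getElem_map, List.getElem_range]
      rw [coeff_mul_one_add_X_pow, hb2 i, if_pos h]
      congr 1
      by_cases hm : m ≤ i
      · rw [if_pos hm, if_pos hm, hb2 (i - m), if_pos (by omega)]
      · rw [if_neg hm, if_neg hm]
    · rw [List.getD_eq_default _ _ (by simpa using h), if_neg (by omega)]

-- coefficient of p * (1+X^m)^D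
lemma coeff_mul_one_add_X_pow_pow (p : Polynomial ℤ) (m D i : Nat) :
    (p * (1 + Polynomial.X ^ m) ^ D).coeff i
      = ∑ k ∈ Finset.range (D + 1),
          if m * k ≤ i then p.coeff (i - m * k) * (Nat.choose D k : Int) else 0 := by
  rw [add_comm (1 : Polynomial ℤ) (Polynomial.X ^ m), add_pow]
  simp only [one_pow, mul_one]
  rw [Finset.mul_sum, Polynomial.finset_sum_coeff]
  apply Finset.sum_congr rfl
  intro k _
  rw [← pow_mul, show ((Nat.choose D k : Polynomial ℤ)) = Polynomial.C ((Nat.choose D k : Int)) by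
      simp, ← mul_assoc, Polynomial.coeff_mul_C, Polynomial.coeff_mul_X_pow']
  split_ifs with h
  · rfl
  · simp

lemma rep_pow_aux {n : Nat} : ∀ (N : Nat) (e : Int), e.toNat ≤ N →
    ∀ (base result : List Int) (p r : Polynomial ℤ),
    pvRep n base p → pvRep n result r →
    pvRep n (pvPowT n base result e) (r * p ^ e.toNat) := by
  intro N
  induction N with
  | zero =>
    intro e he base result p r hb hr
    rw [pvPowT, dif_neg (by omega)]
    have h0 : e.toNat = 0 := by omega
    rw [h0, pow_zero, mul_one]
    exact hr
  | succ N ih =>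
    intro e he base result p r hb hr
    by_cases hpos : 0 < e
    · rw [pvPowT, dif_pos hpos]
      have hshift : e >>> (1 : Nat) = e / 2 := by
        rw [Int.shiftRight_eq_div_pow]; norm_num
      have hband : PySem.Int.band e 1 = PySem.Int.mod e 2 := PySem.Int.band_one e
      have hmod : PySem.Int.mod e 2 = e % 2 := PySem.Int.mod_eq_emod_of_pos (by omega)
      have hle : (e >>> (1 : Nat)).toNat ≤ N := by rw [hshift]; omega
      have hbase2 : pvRep n (pvMulT n base base) (p * p) := rep_mulT hb hb
      by_cases hodd : PySem.Int.band e 1 ≠ 0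
      · rw [if_pos hodd]
        have hres : pvRep n (pvMulT n result base) (r * p) := rep_mulT hr hb
        have hrec := ih (e >>> (1 : Nat)) hle (pvMulT n base base) (pvMulT n result base)
          (p * p) (r * p) hbase2 hres
        have harith : (r * p) * (p * p) ^ ((e >>> (1 : Nat)).toNat) = r * p ^ e.toNat := by
          have h1 : e % 2 = 1 := by
            rw [hband, hmod] at hodd; omega
          have h2 : e.toNat = 2 * ((e >>> (1 : Nat)).toNat) + 1 := by rw [hshift]; omega
          rw [h2, pow_succ, pow_mul]
          ring
        rw [← harith]
        exact hrec
      · rw [if_neg hodd]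
        have hrec := ih (e >>> (1 : Nat)) hle (pvMulT n base base) result
          (p * p) r hbase2 hr
        have harith : r * (p * p) ^ ((e >>> (1 : Nat)).toNat) = r * p ^ e.toNat := by
          have h1 : e % 2 = 0 := by
            have h0 := not_not.mp hodd
            rw [hband, hmod] at h0
            omega
          have h2 : e.toNat = 2 * ((e >>> (1 : Nat)).toNat) := by rw [hshift]; omega
          rw [h2, pow_mul]
          ring
        rw [← harith]
        exact hrec
    · rw [pvPowT, dif_neg hpos]
      have h0 : e.toNat = 0 := by omega
      rw [h0, pow_zero, mul_one]
      exact hr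

lemma rep_pow {n : Nat} (e : Int) (base result : List Int) (p r : Polynomial ℤ)
    (hb : pvRep n base p) (hr : pvRep n result r) :
    pvRep n (pvPowT n base result e) (r * p ^ e.toNat) :=
  rep_pow_aux e.toNat e le_rfl base result p r hb hr

-- a fold of pvRep-preserving steps multiplies the represented polynomial by the list product
lemma rep_fold {n : Nat} (step : List Int → Nat → List Int) (f : Nat → Polynomial ℤ) :
    ∀ (l : List Nat) (c : List Int) (p : Polynomial ℤ),
    (∀ m ∈ l, ∀ c' p', pvRep n c' p' → pvRep n (step c' m) (p' * f m)) →
    pvRep n c p → pvRep n (l.foldl step c) (p * (l.map f).prod) := by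
  intro l
  induction l with
  | nil =>
    intro c p _ hc
    simpa using hc
  | cons a l ih =>
    intro c p hstep hc
    simp only [List.foldl_cons, List.map_cons, List.prod_cons]
    have h1 : pvRep n (step c a) (p * f a) := hstep a (by simp) c p hc
    have := ih (step c a) (p * f a) (fun m hm => hstep m (by simp [hm])) h1
    rw [mul_assoc] at this
    exact this

lemma prod_map_pow_list (l : List Nat) (f : Nat → Polynomial ℤ) (D : Nat) :
    (l.map (fun m => f m ^ D)).prod = (l.map f).prod ^ D := by
  induction l with
  | nil => simp
  | cons a l ih => simp [ih, mul_pow]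

-- A's per-mode step multiplies by (1+X^m)^(d.toNat), for 0 ≤ d ≤ bound checks
lemma rep_AStep (d max_w : Int) (m : Nat) (hd : 0 ≤ d) (hw : 0 ≤ max_w) (hm : 1 ≤ m)
    {c : List Int} {p : Polynomial ℤ} (hc : pvRep ((max_w + 1).toNat) c p) :
    pvRep ((max_w + 1).toNat)
      ((List.range (min d (PySem.Int.floordiv max_w (m : Int)) + 1).toNat).foldl (fun nc k =>
        (List.range ((max_w + 1).toNat - m * k)).foldl (fun nc j =>
          nc.set (j + m * k) (nc.getD (j + m * k) 0 + c.getD j 0 * (Nat.choose d.toNat k : Int))) nc)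
        (List.replicate ((max_w + 1).toNat) (0:Int)))
      (p * (1 + Polynomial.X ^ m) ^ d.toNat) := by
  obtain ⟨hc1, hc2⟩ := hc
  set n := (max_w + 1).toNat with hn
  set q := PySem.Int.floordiv max_w (m : Int) with hqdef
  set K := (min d q + 1).toNat with hKdef
  set D := d.toNat with hDdef
  have hmpos : (0 : Int) < (m : Int) := by exact_mod_cast hm
  have hq0 : 0 ≤ q := (PySem.Int.le_floordiv_iff_mul_le hmpos).mpr (by simpa using hw)
  have hqN : q.toNat = max_w.toNat / m := by
    have h1 : q = ((max_w.toNat / m : Nat) : Int) := by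
      rw [hqdef]
      conv_lhs => rw [show max_w = ((max_w.toNat : Nat) : Int) by omega]
      exact PySem.Int.floordiv_natCast _ _
    omega
  have hn1 : 1 ≤ n := by omega
  obtain ⟨hL, hG⟩ := gloop n (fun k => m * k)
    (fun k j => c.getD j 0 * (Nat.choose D k : Int)) K
  constructor
  · exact hL
  · intro i
    rw [hG i]
    rcases Nat.lt_or_ge i n with hi | hi
    · rw [if_pos hi, coeff_mul_one_add_X_pow_pow]
      -- both sums equal the sum over range (K + D + 1) of the common guarded term
      set M := K + (D + 1) with hM
      have hsubK : Finset.range K ⊆ Finset.range M := by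
        intro x hx
        simp only [Finset.mem_range] at hx ⊢
        omega
      have hsubD : Finset.range (D + 1) ⊆ Finset.range M := by
        intro x hx
        simp only [Finset.mem_range] at hx ⊢
        omega
      have hLHS : (∑ k ∈ Finset.range K,
            if m * k ≤ i ∧ i < n then c.getD (i - m * k) 0 * (Nat.choose D k : Int) else 0)
          = ∑ k ∈ Finset.range M,
            if m * k ≤ i then p.coeff (i - m * k) * (Nat.choose D k : Int) else 0 := by
        have hcongr : ∀ k ∈ Finset.range K,
            (if m * k ≤ i ∧ i < n then c.getD (i - m * k) 0 * (Nat.choose D k : Int) else 0)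
            = if m * k ≤ i then p.coeff (i - m * k) * (Nat.choose D k : Int) else 0 := by
          intro k hk
          by_cases hg : m * k ≤ i
          · rw [if_pos ⟨hg, hi⟩, if_pos hg, hc2 (i - m * k), if_pos (by omega)]
          · rw [if_neg (by intro hcc; exact hg hcc.1), if_neg hg]
        have hzeroK : ∀ k ∈ Finset.range M, k ∉ Finset.range K →
            (if m * k ≤ i then p.coeff (i - m * k) * (Nat.choose D k : Int) else 0) = 0 := by
          -- k ≥ K: either k > d (choose = 0) or m*k > max_w ≥ i (guard fails)
          intro k hk1 hk2
          have hk2' : K ≤ k := by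
            by_contra hcon
            exact hk2 (Finset.mem_range.mpr (by omega))
          rcases min_cases d q with ⟨hmeq, _⟩ | ⟨hmeq, _⟩
          · -- min = d : k > d.toNat
            have hkd : D < k := by rw [hKdef, hmeq] at hk2'; omega
            rw [Nat.choose_eq_zero_of_lt hkd]
            split_ifs <;> simp
          · -- min = q : m * k > max_w ≥ i
            have hkq : q.toNat < k := by rw [hKdef, hmeq] at hk2'; omega
            have hmk : max_w.toNat < m * k := by
              have hdm := Nat.div_add_mod max_w.toNat m
              have hmod := Nat.mod_lt max_w.toNat (show 0 < m by omega)
              have hle : max_w.toNat / m + 1 ≤ k := by omega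
              have h3 : m * (max_w.toNat / m + 1) ≤ m * k := Nat.mul_le_mul_left m hle
              have h4 : m * (max_w.toNat / m + 1) = m * (max_w.toNat / m) + m := by ring
              omega
            rw [if_neg (by omega)]
        rw [Finset.sum_congr rfl hcongr, Finset.sum_subset hsubK hzeroK]
      have hRHS : (∑ k ∈ Finset.range (D + 1),
            if m * k ≤ i then p.coeff (i - m * k) * (Nat.choose D k : Int) else 0)
          = ∑ k ∈ Finset.range M,
            if m * k ≤ i then p.coeff (i - m * k) * (Nat.choose D k : Int) else 0 := by
        apply Finset.sum_subset hsubD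
        intro k hk1 hk2
        have hk2' : D + 1 ≤ k := by
          by_contra hcon
          exact hk2 (Finset.mem_range.mpr (by omega))
        rw [Nat.choose_eq_zero_of_lt (by omega)]
        split_ifs <;> simp
      rw [hLHS, hRHS]
    · rw [if_neg (by omega)]
      apply Finset.sum_eq_zero
      intro k _
      rw [if_neg (by omega)]

-- ===== VERDICT (by name: the statement is the Claim_ definition above) =====
theorem exterior_algebra_dims_spec : Claim_equal_exterior_algebra_dims := by
  intro d max_w _ hpre
  unfold Spec_exterior_algebra_dims
  obtain ⟨hw, hdor⟩ := hpre
  set n := (max_w + 1).toNat with hn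
  have hn1 : 1 ≤ n := by omega
  have hd : ∀ m ∈ List.range' 1 (n - 1), 0 ≤ d := by
    intro m hm
    rcases hdor with h | h
    · exact h
    · exfalso
      have := List.mem_range'_1.mp hm
      rw [h] at hn
      simp at hn
      omega
  set D := d.toNat with hD
  -- A's result represents (Π (1+X^m)^D)
  have hA : pvRep n (exterior_algebra_dims d max_w)
      (1 * ((List.range' 1 (n - 1)).map (fun m => (1 + Polynomial.X ^ m) ^ D)).prod) := by
    unfold exterior_algebra_dims
    rw [← hn]
    apply rep_fold _ _ _ _ _ (fun m hm c' p' hc' => by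
        have hm' := List.mem_range'_1.mp hm
        exact rep_AStep d max_w m (hd m hm) hw hm'.1 hc')
      (rep_one hn1)
  -- B's base represents (Π (1+X^m)), so B's result represents 1 * (Π (1+X^m))^D
  have hB : pvRep n (exterior_algebra_dims_alt d max_w)
      (1 * (1 * ((List.range' 1 (n - 1)).map (fun m => 1 + Polynomial.X ^ m)).prod) ^ D) := by
    unfold exterior_algebra_dims_alt
    rw [← hn]
    apply rep_pow d _ _ _ _
      (rep_fold _ _ _ _ _ (fun m hm c' p' hc' => rep_baseStep m hc') (rep_one hn1))
      (rep_one hn1)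
  have hpoly : (1 : Polynomial ℤ) * ((List.range' 1 (n - 1)).map (fun m => (1 + Polynomial.X ^ m) ^ D)).prod
      = 1 * (1 * ((List.range' 1 (n - 1)).map (fun m => 1 + Polynomial.X ^ m)).prod) ^ D := by
    rw [one_mul, one_mul, one_mul, prod_map_pow_list]
  rw [hpoly] at hA
  exact rep_eq hA hB
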